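-- pv_equiv track=rewrite | github.com/Kinshuk699/VibeCheck | app.py | _normalize_lastfm_artist
-- ===== SOURCE A (Python) =====
-- def _normalize_lastfm_artist(artist: str) -> str:
--     # ACRCloud sometimes returns artist strings like "A/B/C" or "A & B".
--     # For Last.fm calls, prefer the primary artist.
--     s = str(artist or "").strip()
--     for sep in ["/", "&", ",", ";"]:
--         if sep in s:
--             s = s.split(sep, 1)[0].strip()
--     for token in [" feat. ", " feat ", " ft. ", " ft ", " featuring "]:
--         if token in s.lower():
--             idx = s.lower().find(token)
--             s = s[:idx].strip()
--     return s
-- ===== SOURCE B (Python) =====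
-- _FEAT_TOKENS = (" feat. ", " feat ", " ft. ", " ft ", " featuring ")
--
--
-- def _drop_feats(s, tokens):
--     # Recursively cut at the first case-insensitive occurrence of each token in order.
--     if not tokens:
--         return s
--     i = s.lower().find(tokens[0])
--     if i >= 0:
--         s = s[:i].rstrip()
--     return _drop_feats(s, tokens[1:])
--
--
-- def _normalize_lastfm_artist(artist: str) -> str:
--     s = (artist or "").strip()
--     # One character scan: cut before the earliest separator character, if any.
--     cut = len(s)
--     for i, ch in enumerate(s):
--         if ch in "/&,;":
--             cut = i
--             break
--     return _drop_feats(s[:cut].rstrip(), _FEAT_TOKENS)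
-- ===== Notes on version B (the rewrite author's own statement) =====
-- stated objective: alternative
-- what changed: A truncates in four sequential passes, each testing membership of one separator and then splitting and stripping; B scans the characters once and cuts at the earliest separator character (equivalent because the intermediate strips only shave whitespace off prefixes), and it drops the feat tokens with a recursive helper built on find, slicing and rstrip instead of membership tests with split-style truncation.
import Mathlib
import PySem

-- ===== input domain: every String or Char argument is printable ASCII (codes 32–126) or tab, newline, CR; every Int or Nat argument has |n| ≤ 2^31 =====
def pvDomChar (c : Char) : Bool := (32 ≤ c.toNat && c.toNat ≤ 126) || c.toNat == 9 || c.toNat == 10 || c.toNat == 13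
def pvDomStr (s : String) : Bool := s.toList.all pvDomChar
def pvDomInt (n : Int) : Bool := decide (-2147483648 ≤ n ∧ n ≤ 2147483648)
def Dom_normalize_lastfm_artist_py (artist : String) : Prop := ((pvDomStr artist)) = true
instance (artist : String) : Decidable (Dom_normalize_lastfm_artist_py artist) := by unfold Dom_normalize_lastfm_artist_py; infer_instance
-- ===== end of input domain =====

-- B replaces A's four per-separator 'if sep in s: split-and-strip' passes by one character scan to the
-- earliest separator plus a recursive feat-token dropper using find/rstrip (objective: alternative).

-- ===== PORT A =====
-- one round of A's first loop: 'if sep in s: s = s.split(sep, 1)[0].strip()'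
def pvAcutSep (s sep : List Char) : List Char :=
  if PySem.Chars.isIn sep s then
    -- s.split(sep, 1)[0]: sep ≠ "" so split? is some, and split(…) is never empty, so [0] exists;
    -- the getD defaults are unreachable
    PySem.Chars.strip ((PySem.List.pyGet? ((PySem.Chars.splitMax? s sep 1).getD []) 0).getD [])
  else s

-- one round of A's second loop: 'if token in s.lower(): idx = s.lower().find(token); s = s[:idx].strip()'
def pvAcutFeat (s tok : List Char) : List Char :=
  if PySem.Chars.isIn tok (PySem.Chars.lower s) then
    PySem.Chars.strip (PySem.Chars.slice s none (some (PySem.Chars.find (PySem.Chars.lower s) tok)))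
  else s

def normalize_lastfm_artist_py (artist : String) : String :=
  -- s = str(artist or "").strip(): for a str argument, 'str(artist or "")' is artist itself
  String.ofList
    ([" feat. ".toList, " feat ".toList, " ft. ".toList, " ft ".toList, " featuring ".toList].foldl
      pvAcutFeat
      ([['/'], ['&'], [','], [';']].foldl pvAcutSep (PySem.Chars.strip artist.toList)))

-- ===== PORT B =====
def pvFeatTokens : List (List Char) :=
  [" feat. ".toList, " feat ".toList, " ft. ".toList, " ft ".toList, " featuring ".toList]

-- 'for i, ch in enumerate(s): if ch in "/&,;": cut = i; break' (cut starts at len(s))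
def pvBscan : List Char → Nat → Nat
  | [], i => i
  | c :: rest, i => if PySem.Chars.isIn [c] ['/', '&', ',', ';'] then i else pvBscan rest (i + 1)

-- _drop_feats: recursively cut at the first case-insensitive occurrence of each token in order
def pvBdrop : List Char → List (List Char) → List Char
  | s, [] => s
  | s, t :: ts =>
    let i := PySem.Chars.find (PySem.Chars.lower s) t
    pvBdrop (if 0 ≤ i then PySem.Chars.rstrip (PySem.Chars.slice s none (some i)) else s) ts

def normalize_lastfm_artist_py_alt (artist : String) : String :=
  String.ofList
    (pvBdrop
      (PySem.Chars.rstrip (PySem.Chars.slice (PySem.Chars.strip artist.toList) none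
        (some ((pvBscan (PySem.Chars.strip artist.toList) 0 : Nat) : Int))))
      pvFeatTokens)

-- ===== PRECONDITION & SPEC =====
def Spec_normalize_lastfm_artist_py (artist : String) (out : String) : Prop := out = normalize_lastfm_artist_py_alt artist
instance (artist : String) (out : String) : Decidable (Spec_normalize_lastfm_artist_py artist out) := by unfold Spec_normalize_lastfm_artist_py; infer_instance

-- ===== CLAIM (what is proved, stated in full; the proofs are below) =====
def Claim_equal_normalize_lastfm_artist_py : Prop := ∀ (artist : String), Dom_normalize_lastfm_artist_py artist → Spec_normalize_lastfm_artist_py artist (normalize_lastfm_artist_py artist)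

-- ===== LEMMAS AND PROOFS =====

-- "left-stripped": no leading whitespace
def pvLS (s : List Char) : Prop := PySem.Chars.lstrip s = s
-- "stripped": no leading and no trailing whitespace
def pvST (s : List Char) : Prop := pvLS s ∧ PySem.Chars.rstrip s = s

theorem pvLS_of_prefix {u v : List Char} (h : v <+: u) (hu : pvLS u) : pvLS v := by
  unfold pvLS PySem.Chars.lstrip at *
  rw [List.dropWhile_eq_self_iff] at *
  intro hl
  obtain ⟨t, rfl⟩ := h
  have := hu (by simp; omega)
  simpa [List.getElem_append, hl] using this

theorem pvRstrip_prefix (u : List Char) : PySem.Chars.rstrip u <+: u := by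
  unfold PySem.Chars.rstrip
  conv_rhs => rw [← List.reverse_reverse u]
  exact List.reverse_prefix.mpr (List.dropWhile_suffix _)

theorem pvRstrip_idem (u : List Char) : PySem.Chars.rstrip (PySem.Chars.rstrip u) = PySem.Chars.rstrip u := by
  simp [PySem.Chars.rstrip, List.dropWhile_idempotent]

theorem pvStrip_eq_rstrip {v : List Char} (h : pvLS v) : PySem.Chars.strip v = PySem.Chars.rstrip v := by
  unfold PySem.Chars.strip
  rw [h]

theorem pvST_strip (u : List Char) : pvST (PySem.Chars.strip u) := by
  constructor
  · have h1 : pvLS (PySem.Chars.lstrip u) := by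
      unfold pvLS PySem.Chars.lstrip; exact List.dropWhile_idempotent _ _
    exact pvLS_of_prefix (by unfold PySem.Chars.strip; exact pvRstrip_prefix _) h1
  · unfold PySem.Chars.strip; exact pvRstrip_idem _

theorem pvRstrip_append_spaces {v w : List Char} (hw : ∀ c ∈ w, PySem.Chars.isspace c = true) :
    PySem.Chars.rstrip (v ++ w) = PySem.Chars.rstrip v := by
  unfold PySem.Chars.rstrip
  have h0 : List.dropWhile PySem.Chars.isspace w.reverse = [] :=
    List.dropWhile_eq_nil_iff.mpr (fun c hc => hw c (List.mem_reverse.mp hc))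
  rw [List.reverse_append, List.dropWhile_append, h0]
  simp

-- u splits as its rstrip followed by whitespace
theorem pvRstrip_decomp (u : List Char) :
    u = PySem.Chars.rstrip u ++ (u.reverse.takeWhile PySem.Chars.isspace).reverse ∧
    ∀ c ∈ (u.reverse.takeWhile PySem.Chars.isspace).reverse, PySem.Chars.isspace c = true := by
  constructor
  · conv_lhs => rw [← List.reverse_reverse u,
      ← List.takeWhile_append_dropWhile (p := PySem.Chars.isspace) (l := u.reverse)]
    rw [List.reverse_append]
    rfl
  · intro c hc
    exact List.mem_takeWhile_imp (List.mem_reverse.mp hc)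

-- the key commuting fact: truncating after an rstrip lands where truncating before it does
theorem pvRstrip_takeWhile_rstrip (P : Char → Bool) (u : List Char) :
    PySem.Chars.rstrip ((PySem.Chars.rstrip u).takeWhile P) = PySem.Chars.rstrip (u.takeWhile P) := by
  obtain ⟨hdec, hws⟩ := pvRstrip_decomp u
  set v := PySem.Chars.rstrip u with hv
  set w := (u.reverse.takeWhile PySem.Chars.isspace).reverse with hw
  conv_rhs => rw [hdec]
  rw [List.takeWhile_append]
  by_cases hvfull : (v.takeWhile P).length = v.length
  · have hvv : v.takeWhile P = v := (List.takeWhile_prefix P).eq_of_length hvfull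
    rw [if_pos hvfull, hvv]
    rw [pvRstrip_append_spaces (fun c hc => hws c ((List.takeWhile_prefix P).subset hc))]
  · rw [if_neg hvfull]

theorem pvIsIn_singleton (c : Char) (s : List Char) : PySem.Chars.isIn [c] s = s.contains c := by
  by_cases h : c ∈ s
  · rw [(PySem.Chars.isIn_iff_infix _ _).mpr
      (by obtain ⟨l, r, rfl⟩ := List.append_of_mem h; exact ⟨l, r, by simp⟩)]
    simp [h]
  · rw [(PySem.Chars.isIn_eq_false_iff _ _).mpr (by rintro ⟨l, r, rfl⟩; exact h (by simp))]
    simp [h]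

theorem pvGoZero (c : Char) (fuel : Nat) (l : List Char) (acc : List (List Char)) :
    PySem.Chars.splitOnMax.go [c] fuel 0 l [] acc = (l :: acc).reverse := by
  cases fuel with
  | zero => simp [PySem.Chars.splitOnMax.go]
  | succ f => cases l with
    | nil => simp [PySem.Chars.splitOnMax.go]
    | cons a t => simp [PySem.Chars.splitOnMax.go]

theorem pvGoOne (c : Char) :
    ∀ (l : List Char) (fuel : Nat) (cur : List Char), l.length ≤ fuel →
      PySem.Chars.splitOnMax.go [c] (fuel + 1) 1 l cur [] =
        if l.contains c then
          [cur.reverse ++ l.takeWhile (· ≠ c), (l.dropWhile (· ≠ c)).drop 1]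
        else [cur.reverse ++ l]
  | [], fuel, cur, _ => by simp [PySem.Chars.splitOnMax.go]
  | a :: t, fuel, cur, h => by
    rw [show PySem.Chars.splitOnMax.go [c] (fuel+1) 1 (a :: t) cur [] =
        (if [c].isPrefixOf (a :: t) then
          PySem.Chars.splitOnMax.go [c] fuel 0 (List.drop 1 (a::t)) [] [cur.reverse]
         else PySem.Chars.splitOnMax.go [c] fuel 1 t (a :: cur) []) from by
      simp [PySem.Chars.splitOnMax.go, List.isPrefixOf]]
    by_cases hac : a = c
    · subst hac
      simp [List.isPrefixOf, pvGoZero]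
    · have hfuel : ∃ f, fuel = f + 1 := ⟨fuel - 1, by simp at h; omega⟩
      obtain ⟨f, rfl⟩ := hfuel
      rw [if_neg (by simp [List.isPrefixOf, Ne.symm hac])]
      rw [pvGoOne c t f (a :: cur) (by simp at h; omega)]
      by_cases hct : t.contains c
      · simp [hac, Ne.symm hac]
      · simp [hac, Ne.symm hac]

-- one A-round on a single-char separator, characterised
theorem pvAcutSep_char {s : List Char} (c : Char) (hs : pvST s) :
    pvAcutSep s [c] = PySem.Chars.rstrip (s.takeWhile (· ≠ c)) ∧ pvST (pvAcutSep s [c]) := by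
  have hmain : pvAcutSep s [c] = PySem.Chars.rstrip (s.takeWhile (· ≠ c)) := by
    unfold pvAcutSep
    by_cases hin : PySem.Chars.isIn [c] s
    · rw [if_pos hin]
      have hc : s.contains c := by rw [← pvIsIn_singleton]; exact hin
      rw [show PySem.Chars.splitMax? s [c] 1 =
          some (PySem.Chars.splitOnMax.go [c] (s.length + 1) 1 s [] []) from by
        simp [PySem.Chars.splitMax?, PySem.Chars.splitOnMax]]
      rw [pvGoOne c s s.length [] le_rfl, if_pos hc]
      simp only [Option.getD_some, List.reverse_nil, List.nil_append, PySem.List.pyGet?]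
      norm_num
      exact pvStrip_eq_rstrip (pvLS_of_prefix (List.takeWhile_prefix _) hs.1)
    · rw [if_neg hin]
      have hc : c ∉ s := by
        have := (PySem.Chars.isIn_eq_false_iff [c] s).mp (by simpa using hin)
        intro hmem
        exact this (by obtain ⟨l, r, rfl⟩ := List.append_of_mem hmem; exact ⟨l, r, by simp⟩)
      rw [show s.takeWhile (· ≠ c) = s from by
        rw [List.takeWhile_eq_self_iff]; intro a ha; simp; rintro rfl; exact hc ha]
      exact hs.2.symm
  refine ⟨hmain, ?_, ?_⟩
  · rw [hmain]
    exact pvLS_of_prefix ((pvRstrip_prefix _).trans (List.takeWhile_prefix _)) hs.1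
  · rw [hmain]
    exact pvRstrip_idem _

-- A's whole first loop = one cut at the earliest separator character
theorem pvPhase1 : ∀ (S : List Char) (s : List Char), pvST s →
    (S.map (fun c => [c])).foldl pvAcutSep s =
      PySem.Chars.rstrip (s.takeWhile (fun ch => !S.contains ch))
  | [], s, hs => by
    simpa [List.takeWhile_eq_self_iff.mpr (fun a _ => rfl)] using hs.2.symm
  | c :: S', s, hs => by
    obtain ⟨hstep, hst⟩ := pvAcutSep_char c hs
    rw [List.map_cons, List.foldl_cons, hstep,
      pvPhase1 S' _ (hstep ▸ hst),
      pvRstrip_takeWhile_rstrip, List.takeWhile_takeWhile]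
    congr 1
    congr 1
    funext a
    by_cases h1 : a = c
    · simp [h1]
    · simp [h1]

theorem pvBscan_spec : ∀ (s : List Char) (i : Nat),
    pvBscan s i = i + (s.takeWhile (fun ch => !(['/', '&', ',', ';'].contains ch))).length
  | [], i => by simp [pvBscan]
  | c :: rest, i => by
    rw [pvBscan, pvIsIn_singleton]
    cases hb : (['/', '&', ',', ';'] : List Char).contains c
    · rw [List.takeWhile_cons]
      simp only [hb, Bool.not_false, if_true, Bool.false_eq_true, if_false]
      rw [pvBscan_spec rest (i + 1)]
      simp; omega
    · rw [List.takeWhile_cons]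
      simp only [hb, Bool.not_true]
      simp

-- A's second loop and B's recursive dropper agree on left-stripped strings
theorem pvPhase2 : ∀ (ts : List (List Char)) (s : List Char), pvLS s →
    ts.foldl pvAcutFeat s = pvBdrop s ts
  | [], s, _ => by simp [pvBdrop]
  | t :: ts, s, hls => by
    rw [List.foldl_cons, pvBdrop]
    by_cases h : PySem.Chars.isIn t (PySem.Chars.lower s)
    · have hpos : 0 ≤ PySem.Chars.find (PySem.Chars.lower s) t :=
        (PySem.Chars.find_nonneg_iff _ _).mpr ((PySem.Chars.isIn_iff_infix _ _).mp h)
      have hsl : PySem.Chars.slice s none (some (PySem.Chars.find (PySem.Chars.lower s) t)) =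
          s.take (PySem.Chars.find (PySem.Chars.lower s) t).toNat := by
        simp [PySem.Chars.slice_eq_listSlice, PySem.List.slice_to _ hpos]
      have hstep : pvAcutFeat s t =
          PySem.Chars.rstrip (PySem.Chars.slice s none (some (PySem.Chars.find (PySem.Chars.lower s) t))) := by
        unfold pvAcutFeat
        rw [if_pos h, hsl]
        exact pvStrip_eq_rstrip (pvLS_of_prefix (List.take_prefix _ _) hls)
      rw [hstep, if_pos hpos]
      exact pvPhase2 ts _
        (pvLS_of_prefix ((pvRstrip_prefix _).trans (hsl ▸ List.take_prefix _ _)) hls)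
    · have hneg : ¬ 0 ≤ PySem.Chars.find (PySem.Chars.lower s) t := by
        intro h0
        exact h ((PySem.Chars.isIn_iff_infix _ _).mpr ((PySem.Chars.find_nonneg_iff _ _).mp h0))
      have hstep : pvAcutFeat s t = s := by unfold pvAcutFeat; rw [if_neg h]
      rw [hstep, if_neg hneg]
      exact pvPhase2 ts s hls

-- ===== VERDICT (by name: the statement is the Claim_ definition above) =====
theorem normalize_lastfm_artist_py_spec : Claim_equal_normalize_lastfm_artist_py := by
  intro artist _
  unfold Spec_normalize_lastfm_artist_py normalize_lastfm_artist_py normalize_lastfm_artist_py_alt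
  have hst := pvST_strip artist.toList
  set cs := PySem.Chars.strip artist.toList with hcs
  set P : Char → Bool := fun ch => !(['/', '&', ',', ';'] : List Char).contains ch with hP
  -- phase 1 on the A side: the four sequential split-and-strip rounds …
  have hA1 : ([['/'], ['&'], [','], [';']] : List (List Char)).foldl pvAcutSep cs =
      PySem.Chars.rstrip (cs.takeWhile P) := by
    have h := pvPhase1 ['/', '&', ',', ';'] cs hst
    simp only [List.map_cons, List.map_nil] at h
    rw [h, hP]
  -- … and phase 1 on the B side: the single scan-and-cut both land on the same string
  have hB1 : PySem.Chars.rstrip (PySem.Chars.slice cs none (some ((pvBscan cs 0 : Nat) : Int))) =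
      PySem.Chars.rstrip (cs.takeWhile P) := by
    have hcut : pvBscan cs 0 = (cs.takeWhile P).length := by
      rw [pvBscan_spec, ← hP]; omega
    rw [hcut,
      show PySem.Chars.slice cs none (some (((cs.takeWhile P).length : Nat) : Int)) =
        cs.take (cs.takeWhile P).length from by
          simp [PySem.Chars.slice_eq_listSlice, PySem.List.slice_to _ (Int.natCast_nonneg _)]]
    rw [← List.prefix_iff_eq_take.mp (List.takeWhile_prefix _)]
  have hls : pvLS (PySem.Chars.rstrip (cs.takeWhile P)) :=
    pvLS_of_prefix ((pvRstrip_prefix _).trans (List.takeWhile_prefix _)) hst.1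
  rw [hA1, hB1, pvPhase2 _ _ hls]
  rfl
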